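-- pv_equiv track=rewrite | github.com/HannaSpiv/QA-Automation-Python | module_01_python_basics/lesson_06_functions_part2/main.py | snake_talk
-- ===== SOURCE A (Python) =====
-- def snake_talk(text):
--     result = ""
--     for c in text:
--         if c in "aeiouyAEIOUY":
--             result += c * 2
--         else:
--             result += c
--     return result
-- ===== SOURCE B (Python) =====
-- def snake_talk(text):
--     for v in "aeiouyAEIOUY":
--         text = text.replace(v, v + v)
--     return text
-- ===== Notes on version B (the rewrite author's own statement) =====
-- stated objective: alternative
-- what changed: Replaces A's single per-character Python loop (branch + string concatenation) by twelve staged whole-string str.replace passes, one per vowel; correct because the vowels are distinct and replace never rescans inserted text.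
import Mathlib
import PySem

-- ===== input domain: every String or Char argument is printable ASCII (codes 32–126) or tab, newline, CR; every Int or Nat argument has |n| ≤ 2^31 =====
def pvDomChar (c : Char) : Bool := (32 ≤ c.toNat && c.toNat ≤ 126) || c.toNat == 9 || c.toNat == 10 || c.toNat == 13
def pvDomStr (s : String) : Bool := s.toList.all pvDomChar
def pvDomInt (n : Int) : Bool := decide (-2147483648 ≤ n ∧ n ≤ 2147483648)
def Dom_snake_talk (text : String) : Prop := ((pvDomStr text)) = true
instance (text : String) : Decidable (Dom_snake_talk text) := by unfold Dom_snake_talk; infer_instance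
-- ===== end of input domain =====

-- B replaces A's single per-character pass by twelve staged whole-string replace passes, one per vowel (alternative decomposition, same cost class).

-- ===== PORT A =====
-- result = ""; for c in text: result += c*2 if c in "aeiouyAEIOUY" else c
def snake_talk (text : String) : String :=
  text.toList.foldl
    (fun result c =>
      if ("aeiouyAEIOUY".toList).contains c then result ++ String.ofList [c, c]
      else result ++ String.ofList [c])
    ""

-- ===== PORT B =====
-- for v in "aeiouyAEIOUY": text = text.replace(v, v + v); return text
def snake_talk_alt (text : String) : String :=
  ("aeiouyAEIOUY".toList).foldl
    (fun t v => PySem.Str.replace t (String.ofList [v]) (String.ofList [v, v]))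
    text

-- ===== PRECONDITION & SPEC =====
def Spec_snake_talk (text : String) (out : String) : Prop := out = snake_talk_alt text
instance (text : String) (out : String) : Decidable (Spec_snake_talk text out) := by unfold Spec_snake_talk; infer_instance

-- ===== CLAIM (what is proved, stated in full; the proofs are below) =====
def Claim_equal_snake_talk : Prop := ∀ (text : String), Dom_snake_talk text → Spec_snake_talk text (snake_talk text)

-- ===== LEMMAS AND PROOFS =====

-- per-character doubling with respect to a set of vowels
def pvDbl (vs : List Char) (c : Char) : List Char := if c ∈ vs then [c, c] else [c]

-- Chars.replace.go for a single-char pattern is the per-character doubling pass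
lemma go_char (v : Char) : ∀ (fuel : Nat) (l acc : List Char), l.length ≤ fuel →
    PySem.Chars.replace.go [v] [v, v] fuel l acc =
      acc.reverse ++ l.flatMap (fun c => if c = v then [v, v] else [c]) := by
  intro fuel
  induction fuel with
  | zero =>
    intro l acc h
    have : l = [] := List.eq_nil_of_length_eq_zero (Nat.le_zero.mp h)
    subst this
    simp [PySem.Chars.replace.go]
  | succ f ih =>
    intro l acc h
    cases l with
    | nil => simp [PySem.Chars.replace.go]
    | cons c t =>
      simp only [PySem.Chars.replace.go]
      by_cases hc : c = v
      · subst hc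
        have hpre : [c].isPrefixOf (c :: t) = true := by simp [List.isPrefixOf]
        rw [if_pos hpre]
        have hd : List.drop [c].length (c :: t) = t := by simp
        rw [hd, ih t _ (by simpa using Nat.le_of_succ_le_succ h)]
        simp
      · have hpre : [v].isPrefixOf (c :: t) = false := by
          simp [List.isPrefixOf]; exact fun h' => (hc h'.symm).elim
        rw [if_neg (by simp [hpre])]
        rw [ih t _ (by simpa using Nat.le_of_succ_le_succ h)]
        simp [hc]

lemma replace_char (v : Char) (s : List Char) :
    PySem.Chars.replace s [v] [v, v] = s.flatMap (fun c => if c = v then [v, v] else [c]) := by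
  rw [PySem.Chars.replace]
  simp [go_char v s.length s [] le_rfl]

-- the staged replace passes over a duplicate-free vowel list fuse into one doubling pass
lemma fold_replace (vs : List Char) (hnd : vs.Nodup) (s : List Char) :
    vs.foldl (fun t v => PySem.Chars.replace t [v] [v, v]) s = s.flatMap (pvDbl vs) := by
  induction vs generalizing s with
  | nil =>
    have hid : pvDbl ([] : List Char) = fun c => [c] := funext fun c => by simp [pvDbl]
    rw [List.foldl_nil, hid, List.flatMap_singleton']
  | cons v vs ih =>
    have hv : v ∉ vs := (List.nodup_cons.mp hnd).1
    have hnd' : vs.Nodup := (List.nodup_cons.mp hnd).2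
    rw [List.foldl_cons, replace_char, ih hnd', List.flatMap_assoc]
    apply List.flatMap_congr
    intro c _
    by_cases hc : c = v
    · subst hc
      simp [pvDbl, hv]
    · simp [pvDbl, hc]

-- string-level B fold mirrors the list-level fold
lemma alt_toList (vs : List Char) (s : String) :
    (vs.foldl (fun t v => PySem.Str.replace t (String.ofList [v]) (String.ofList [v, v])) s).toList
      = vs.foldl (fun t v => PySem.Chars.replace t [v] [v, v]) s.toList := by
  induction vs generalizing s with
  | nil => rfl
  | cons v vs ih =>
    rw [List.foldl_cons, List.foldl_cons, ih]
    congr 1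
    simp [PySem.Str.toList_replace]

-- A's fold with string concatenation is the same doubling pass
lemma snake_fold_eq (cs : List Char) (acc : List Char) :
    cs.foldl
      (fun result c =>
        if ("aeiouyAEIOUY".toList).contains c then result ++ String.ofList [c, c]
        else result ++ String.ofList [c])
      (String.ofList acc) =
    String.ofList (acc ++ cs.flatMap (pvDbl ("aeiouyAEIOUY".toList))) := by
  induction cs generalizing acc with
  | nil => simp
  | cons c cs ih =>
    rw [List.foldl_cons, List.flatMap_cons]
    by_cases h : c ∈ "aeiouyAEIOUY".toList
    · have hd : pvDbl ("aeiouyAEIOUY".toList) c = [c, c] := by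
        unfold pvDbl; rw [if_pos h]
      have hc : ("aeiouyAEIOUY".toList).contains c = true := by
        simpa using h
      simp only [hc, if_true, ← String.ofList_append]
      rw [ih (acc ++ [c, c]), hd]
      simp
    · have hd : pvDbl ("aeiouyAEIOUY".toList) c = [c] := by
        unfold pvDbl; rw [if_neg h]
      have hc : ("aeiouyAEIOUY".toList).contains c = false := by
        simpa using h
      simp only [hc, if_false, Bool.false_eq_true, ← String.ofList_append]
      rw [ih (acc ++ [c]), hd]
      simp

-- ===== VERDICT (by name: the statement is the Claim_ definition above) =====
theorem snake_talk_spec : Claim_equal_snake_talk := by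
  intro text _
  unfold Spec_snake_talk snake_talk
  have hA := snake_fold_eq text.toList []
  have hB : (snake_talk_alt text).toList = text.toList.flatMap (pvDbl ("aeiouyAEIOUY".toList)) := by
    unfold snake_talk_alt
    rw [alt_toList, fold_replace _ (by decide)]
  have halt : snake_talk_alt text = String.ofList (text.toList.flatMap (pvDbl ("aeiouyAEIOUY".toList))) := by
    rw [← hB]; exact String.ofList_toList.symm
  rw [halt]
  simpa using hA
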